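-- pv_equiv track=rewrite | github.com/prangelab/scOmnom | src/scomnom/plot_utils.py | _make_unique_labels
-- ===== SOURCE A (Python) =====
-- def _make_unique_labels(labels: dict[str, str]) -> dict[str, str]:
--     """
--     If multiple raw ids map to the same display label, disambiguate by appending [raw].
--     """
--     # invert
--     rev: dict[str, list[str]] = {}
--     for raw, disp in labels.items():
--         rev.setdefault(str(disp), []).append(str(raw))
--
--     out = dict(labels)
--     for disp, raws in rev.items():
--         if len(raws) <= 1:
--             continue
--         for raw in raws:
--             out[raw] = f"{disp} [{raw}]"
--     return out
-- ===== SOURCE B (Python) =====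
-- def _make_unique_labels(labels: dict) -> dict:
--     """
--     If multiple raw ids map to the same display label, disambiguate by appending [raw].
--     """
--     items = [(str(k), str(v)) for k, v in labels.items()]
--
--     def disamb(raw, disp):
--         # duplicated iff some OTHER entry shares the same display label
--         if any(r != raw and d == disp for r, d in items):
--             return f"{disp} [{raw}]"
--         return disp
--
--     out = dict(labels)
--     for raw, disp in items:
--         out[raw] = disamb(raw, disp)
--     return out
-- ===== Notes on version B (the rewrite author's own statement) =====
-- stated objective: alternative
-- what changed: B drops A's inverted display->raw-ids grouping dict entirely: it decides each entry independently by scanning the item list for another entry with the same display label, writing every entry once.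
import Mathlib
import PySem

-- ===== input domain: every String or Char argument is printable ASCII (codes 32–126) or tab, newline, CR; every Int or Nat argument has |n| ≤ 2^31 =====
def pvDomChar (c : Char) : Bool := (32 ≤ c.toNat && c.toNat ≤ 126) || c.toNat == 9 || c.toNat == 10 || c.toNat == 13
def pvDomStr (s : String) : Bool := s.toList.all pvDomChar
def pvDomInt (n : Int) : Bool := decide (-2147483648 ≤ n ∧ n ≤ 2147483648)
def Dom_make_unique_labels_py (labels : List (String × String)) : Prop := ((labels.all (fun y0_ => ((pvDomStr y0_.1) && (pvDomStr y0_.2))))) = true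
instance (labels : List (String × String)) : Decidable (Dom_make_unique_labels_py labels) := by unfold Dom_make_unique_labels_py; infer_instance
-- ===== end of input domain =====

-- B drops A's inverted display->raw-ids grouping dict entirely: it decides each entry
-- independently by scanning the item list for another entry with the same display label.

-- ===== PORT A =====
-- 'labels' (a Python dict) arrives as its item list; dict(...) semantics = PySem.Dict.ofList.
-- str(raw)/str(disp) are the identity on the String values here.
def make_unique_labels_py (labels : List (String × String)) : List (String × String) :=
  let d := PySem.Dict.ofList labels
  -- rev: dict[str, list[str]]; rev.setdefault(str(disp), []).append(str(raw))
  let rev : PySem.Dict String (List String) :=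
    d.items.foldl (fun r p => r.modify p.2 [] (fun g => g ++ [p.1])) PySem.Dict.empty
  -- out = dict(labels); then overwrite every member of a group of size > 1
  let out := rev.items.foldl (fun o q =>
      if q.2.length ≤ 1 then o
      else q.2.foldl (fun o raw => o.insert raw (PySem.Str.join "" [q.1, " [", raw, "]"])) o) d
  out.items

-- ===== PORT B =====
def make_unique_labels_py_alt (labels : List (String × String)) : List (String × String) :=
  let d := PySem.Dict.ofList labels
  let items := d.items
  -- disamb(raw, disp): duplicated iff some OTHER entry shares the same display label
  let disamb := fun (raw disp : String) =>
    if items.any (fun q => q.1 != raw && q.2 == disp)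
    then PySem.Str.join "" [disp, " [", raw, "]"] else disp
  -- out = dict(labels); write every entry once
  let out := items.foldl (fun o p => o.insert p.1 (disamb p.1 p.2)) d
  out.items

-- ===== PRECONDITION & SPEC =====
def Spec_make_unique_labels_py (labels : List (String × String)) (out : List (String × String)) : Prop := out = make_unique_labels_py_alt labels
instance (labels : List (String × String)) (out : List (String × String)) : Decidable (Spec_make_unique_labels_py labels out) := by unfold Spec_make_unique_labels_py; infer_instance

-- ===== CLAIM (what is proved, stated in full; the proofs are below) =====
def Claim_equal_make_unique_labels_py : Prop := ∀ (labels : List (String × String)), Dom_make_unique_labels_py labels → Spec_make_unique_labels_py labels (make_unique_labels_py labels)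

-- ===== LEMMAS AND PROOFS =====

-- the disambiguated item for p = (raw, disp): (raw, "disp [raw]")
def pvF (p : String × String) : String × String := (p.1, PySem.Str.join "" [p.2, " [", p.1, "]"])

-- the raw ids whose display label is v, in order (rev's group for v)
def pvSel (l : List (String × String)) (v : String) : List String :=
  (l.filter (fun p => p.2 == v)).map (fun p => p.1)

-- effect of one overwriting insert (key w.1, value w.2) on one stored item p
def pvStep (p w : String × String) : String × String := if p.1 == w.1 then w else p

-- what both loops do to an item p of the dict
def pvRes (l : List (String × String)) (p : String × String) : String × String :=
  if 1 < List.count p.2 (l.map (fun q => q.2)) then pvF p else p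

-- a run of overwriting inserts whose keys are all already present rewrites the items pointwise
theorem pv_insertFold_items (ws : List (String × String)) (m : PySem.Dict String String)
    (h : ∀ w ∈ ws, m.contains w.1 = true) :
    (ws.foldl (fun o w => o.insert w.1 w.2) m).items
      = m.items.map (fun p => ws.foldl pvStep p) := by
  induction ws generalizing m with
  | nil => simp
  | cons w ws ih =>
      have hw : m.contains w.1 = true := h w (by simp)
      have h' : ∀ w' ∈ ws, (m.insert w.1 w.2).contains w'.1 = true := by
        intro w' hw'
        rw [PySem.Dict.contains_insert]
        simp [h w' (by simp [hw'])]
      calc ((w :: ws).foldl (fun o w => o.insert w.1 w.2) m).items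
          = (ws.foldl (fun o w => o.insert w.1 w.2) (m.insert w.1 w.2)).items := rfl
        _ = (m.insert w.1 w.2).items.map (fun p => ws.foldl pvStep p) := ih _ h'
        _ = m.items.map (fun p => (w :: ws).foldl pvStep p) := by
            rw [PySem.Dict.items_insert_of_contains m w.2 hw, List.map_map]
            exact List.map_congr_left (fun p _ => rfl)

-- fold of pvStep when no write matches
theorem pv_stepFold_nil (ws : List (String × String)) (p : String × String)
    (h : ws.filter (fun w => w.1 == p.1) = []) :
    ws.foldl pvStep p = p := by
  induction ws with
  | nil => rfl
  | cons w ws ih =>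
      rw [List.filter_cons] at h
      by_cases hw : (w.1 == p.1) = true
      · simp [hw] at h
      · have hw2 : (p.1 == w.1) = false := by
          rw [beq_eq_false_iff_ne]
          intro he
          exact hw (by rw [beq_iff_eq]; exact he.symm)
        rw [if_neg (by simp [hw])] at h
        have hstep : (w :: ws).foldl pvStep p = ws.foldl pvStep p := by
          simp [pvStep, hw2]
        rw [hstep]
        exact ih h

-- fold of pvStep when exactly one write matches
theorem pv_stepFold_one (ws : List (String × String)) (p w : String × String)
    (h : ws.filter (fun w => w.1 == p.1) = [w]) :
    ws.foldl pvStep p = w := by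
  induction ws generalizing p with
  | nil => simp at h
  | cons w' ws ih =>
      rw [List.filter_cons] at h
      by_cases hm : (w'.1 == p.1) = true
      · rw [if_pos (by simp [hm])] at h
        obtain ⟨hww, hrest⟩ : w' = w ∧ ws.filter (fun w => w.1 == p.1) = [] := by
          simpa using h
        have hm' : (p.1 == w'.1) = true := by
          rw [beq_iff_eq] at hm ⊢; exact hm.symm
        have hstep : (w' :: ws).foldl pvStep p = ws.foldl pvStep w' := by
          simp [pvStep, hm']
        rw [hstep, ← hww]
        apply pv_stepFold_nil
        have he : w'.1 = p.1 := by rwa [beq_iff_eq] at hm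
        rw [he]
        exact hrest
      · rw [if_neg (by simp [hm])] at h
        have hm2 : (p.1 == w'.1) = false := by
          rw [beq_eq_false_iff_ne]
          intro he
          exact hm (by rw [beq_iff_eq]; exact he.symm)
        have hstep : (w' :: ws).foldl pvStep p = ws.foldl pvStep p := by
          simp [pvStep, hm2]
        rw [hstep]
        exact ih p h

-- A's nested group loop is the flat loop over the flattened write list
theorem pv_nested (L : List (String × List String)) (o : PySem.Dict String String) :
    L.foldl (fun o q => if q.2.length ≤ 1 then o
        else q.2.foldl (fun o raw => o.insert raw (PySem.Str.join "" [q.1, " [", raw, "]"])) o) o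
      = (L.flatMap (fun q => if q.2.length ≤ 1 then []
          else q.2.map (fun raw => (raw, PySem.Str.join "" [q.1, " [", raw, "]"])))).foldl
          (fun o w => o.insert w.1 w.2) o := by
  induction L generalizing o with
  | nil => rfl
  | cons q L ih =>
      rw [List.flatMap_cons, List.foldl_append, List.foldl_cons]
      by_cases hq : q.2.length ≤ 1
      · simp only [if_pos hq]
        exact ih o
      · simp only [if_neg hq]
        rw [List.foldl_map]
        exact ih _

-- filter distributes over flatMap
theorem pv_filter_flatMap {α β : Type} (L : List α) (g : α → List β) (q : β → Bool) :
    (L.flatMap g).filter q = L.flatMap (fun a => (g a).filter q) := by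
  induction L with
  | nil => rfl
  | cons a L ih => simp [List.flatMap_cons, List.filter_append, ih]

-- with distinct keys, filtering l for "key = p.1 and c" keeps exactly p (when c p holds)
theorem pv_filter_key (l : List (String × String)) (p : String × String)
    (hn : (l.map (fun q => q.1)).Nodup) (hp : p ∈ l) (c : String × String → Bool) :
    l.filter (fun r => r.1 == p.1 && c r) = if c p then [p] else [] := by
  induction l with
  | nil => cases hp
  | cons q l ih =>
      have hn' : q.1 ∉ l.map (fun r => r.1) ∧ (l.map (fun r => r.1)).Nodup := by
        rw [List.map_cons, List.nodup_cons] at hn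
        exact hn
      rw [List.filter_cons]
      rcases List.mem_cons.mp hp with hqp | hpl
      · subst hqp
        have hfl : l.filter (fun r => r.1 == p.1 && c r) = [] := by
          apply List.filter_eq_nil_iff.mpr
          intro r hr
          have hne : r.1 ≠ p.1 := by
            intro he
            exact hn'.1 (List.mem_map.mpr ⟨r, hr, he⟩)
          simp [hne]
        by_cases hc : c p = true <;> simp [hc, hfl]
      · have hq : q.1 ≠ p.1 := by
          intro he
          exact hn'.1 (List.mem_map.mpr ⟨p, hpl, he.symm⟩)
        rw [if_neg (by simp [hq])]
        exact ih hn'.2 hpl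

-- flatMap over a Nodup list where only the element a contributes
theorem pv_flatMap_single {β : Type} (V : List String) (a : String) (X : List β)
    (g : String → List β) (hV : V.Nodup) (ha : a ∈ V)
    (hg : ∀ v ∈ V, g v = if v = a then X else []) :
    V.flatMap g = X := by
  induction V with
  | nil => cases ha
  | cons v V ih =>
      rw [List.flatMap_cons]
      by_cases hva : v = a
      · rw [hg v (by simp), if_pos hva]
        have hnil : V.flatMap g = [] := by
          apply List.flatMap_eq_nil_iff.mpr
          intro u hu
          have hune : u ≠ a := by
            intro he
            exact (List.nodup_cons.mp hV).1 (hva ▸ he ▸ hu)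
          rw [hg u (by simp [hu]), if_neg hune]
        simp [hnil]
      · rw [hg v (by simp), if_neg hva]
        have haV : a ∈ V := by
          rcases List.mem_cons.mp ha with h | h
          · exact absurd h.symm hva
          · exact h
        simp [ih (List.nodup_cons.mp hV).2 haV (fun u hu => hg u (by simp [hu]))]

-- count of a display value = size of its group
theorem pv_count_sel (l : List (String × String)) (v : String) :
    List.count v (l.map (fun q => q.2)) = (pvSel l v).length := by
  induction l with
  | nil => rfl
  | cons q l ih =>
      by_cases h : (q.2 == v) = true
      · simp [pvSel, List.count_cons, h] at ih ⊢
        omega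
      · simp [pvSel, List.count_cons, h] at ih ⊢
        exact ih

-- B's duplicate test ("some OTHER entry has the same display") = A's group-size test
theorem pv_dup_iff (l : List (String × String)) (p : String × String)
    (hn : (l.map (fun q => q.1)).Nodup) (hp : p ∈ l) :
    (l.any (fun q => q.1 != p.1 && q.2 == p.2))
      = decide (1 < List.count p.2 (l.map (fun q => q.2))) := by
  have hln : l.Nodup := hn.of_map
  have hcnt : List.count p.2 (l.map (fun q => q.2))
      = (l.filter (fun q => q.2 == p.2)).length := by
    rw [List.count_eq_countP]
    rw [List.countP_map, List.countP_eq_length_filter]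
    rfl
  set F := l.filter (fun q => q.2 == p.2) with hF
  have hpF : p ∈ F := List.mem_filter.mpr ⟨hp, by simp⟩
  have hFn : F.Nodup := hln.filter _
  rw [hcnt]
  by_cases hd : ∃ q ∈ l, q.1 ≠ p.1 ∧ q.2 = p.2
  · obtain ⟨q, hq, hq1, hq2⟩ := hd
    have hqF : q ∈ F := List.mem_filter.mpr ⟨hq, by simp [hq2]⟩
    have hqp : q ≠ p := fun he => hq1 (by rw [he])
    have hlen : 1 < F.length := by
      have h2 : 1 < F.toFinset.card :=
        Finset.one_lt_card.mpr
          ⟨q, List.mem_toFinset.mpr hqF, p, List.mem_toFinset.mpr hpF, hqp⟩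
      have h3 := List.toFinset_card_le F
      omega
    rw [decide_eq_true hlen]
    rw [List.any_eq_true]
    exact ⟨q, hq, by simp [hq1, hq2]⟩
  · push_neg at hd
    have hall : ∀ q ∈ F, q = p := by
      intro q hq
      obtain ⟨hql, hq2⟩ := List.mem_filter.mp hq
      have hq2' : q.2 = p.2 := by simpa using hq2
      by_contra hne
      have hq1 : q.1 ≠ p.1 := by
        intro he
        exact hne (Prod.ext he hq2')
      exact hd q hql hq1 hq2'
    have hlen : ¬ 1 < F.length := by
      intro hlt
      have h1 : p ∈ F.erase p := by
        have := List.length_erase_of_mem hpF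
        have hpos : 0 < (F.erase p).length := by omega
        obtain ⟨q, hq⟩ := List.exists_mem_of_length_pos hpos
        have hqF : q ∈ F := List.mem_of_mem_erase hq
        have hqp : q = p := hall q hqF
        have hq' : q ∈ F.erase p := hq
        rwa [hqp] at hq'
      exact hFn.not_mem_erase h1
    rw [decide_eq_false hlen]
    rw [List.any_eq_false]
    intro q hq
    simp only [Bool.and_eq_true, bne_iff_ne, beq_iff_eq, not_and]
    intro hq1 hq2
    exact hd q hq hq1 hq2

-- port A computes the pointwise rewrite of the dict's items
theorem pv_A (labels : List (String × String)) :
    make_unique_labels_py labels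
      = (PySem.Dict.ofList labels).items.map (pvRes (PySem.Dict.ofList labels).items) := by
  simp only [make_unique_labels_py]
  set d := PySem.Dict.ofList labels with hd
  set l := d.items with hldef
  have hfstn : (l.map (fun q => q.1)).Nodup := by
    have := PySem.Dict.nodup_keys_ofList (ν := String) labels
    simpa [PySem.Dict.keys, hd] using this
  set rev : PySem.Dict String (List String) :=
    l.foldl (fun r p => r.modify p.2 [] (fun g => g ++ [p.1])) PySem.Dict.empty with hrev
  have hrevgetD : ∀ v, rev.getD v [] = pvSel l v := by
    intro v
    have h1 : rev = (l.map (fun p => (p.2, p.1))).foldl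
        (fun r p => r.modify p.1 [] (fun g => g ++ [p.2])) PySem.Dict.empty := by
      rw [hrev, List.foldl_map]
    rw [h1, PySem.Dict.getD_foldl_modify_append, PySem.Dict.getD_empty, List.filter_map,
      List.map_map]
    rfl
  have hrevnodup : rev.keys.Nodup := by
    have := PySem.Dict.nodup_keys_foldl_modify_key l (fun p => p.2) []
      (fun _ p => (fun g => g ++ [p.1])) PySem.Dict.empty (by simp [PySem.Dict.keys_empty])
    simpa [hrev] using this
  have hrevkeys : rev.keys = PySem.Set.ofList (l.map (fun q => q.2)) := by
    have := PySem.Dict.keys_foldl_modify_key l (fun p => p.2) []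
      (fun _ p => (fun g => g ++ [p.1])) PySem.Dict.empty
    rw [hrev]
    rw [this]
    simp [PySem.Dict.keys_empty, PySem.Set.update, PySem.Set.ofList]
  have hrevitems : rev.items = rev.keys.map (fun v => (v, pvSel l v)) := by
    have h2 : rev.keys = rev.items.map (fun q => q.1) := by simp [PySem.Dict.keys]
    rw [h2, List.map_map]
    conv_lhs => rw [← List.map_id rev.items]
    apply List.map_congr_left
    intro q hq
    have h3 : rev.getD q.1 [] = q.2 :=
      PySem.Dict.getD_of_mem_items rev (by simpa using hq) hrevnodup []
    have h4 := hrevgetD q.1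
    rw [h3] at h4
    show q = (q.1, pvSel l q.1)
    rw [← h4]
  set wsA := rev.items.flatMap (fun q => if q.2.length ≤ 1 then []
      else q.2.map (fun raw => (raw, PySem.Str.join "" [q.1, " [", raw, "]"]))) with hws
  rw [pv_nested, ← hws]
  have hcontainsA : ∀ w ∈ wsA, d.contains w.1 = true := by
    intro w hw
    rw [hws, List.mem_flatMap] at hw
    obtain ⟨q, hq, hwq⟩ := hw
    by_cases hlen : q.2.length ≤ 1
    · rw [if_pos hlen] at hwq; cases hwq
    · rw [if_neg hlen, List.mem_map] at hwq
      obtain ⟨raw, hraw, rfl⟩ := hwq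
      rw [hrevitems, List.mem_map] at hq
      obtain ⟨v, hv, rfl⟩ := hq
      rw [PySem.Dict.contains_iff_mem_keys]
      have hk : d.keys = l.map (fun q => q.1) := by
        simp only [PySem.Dict.keys]
        rfl
      rw [hk]
      simp only [pvSel, List.mem_map, List.mem_filter] at hraw
      obtain ⟨r, ⟨hr, _⟩, hr1⟩ := hraw
      exact List.mem_map.mpr ⟨r, hr, hr1⟩
  rw [pv_insertFold_items wsA d hcontainsA]
  apply List.map_congr_left
  intro p hp
  have hmemsnd : p.2 ∈ rev.keys := by
    rw [hrevkeys, PySem.Set.mem_ofList]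
    exact List.mem_map.mpr ⟨p, hp, rfl⟩
  have hfilter : wsA.filter (fun w => w.1 == p.1)
      = if 1 < (pvSel l p.2).length then [pvF p] else [] := by
    rw [hws, hrevitems, List.flatMap_map, pv_filter_flatMap]
    apply pv_flatMap_single rev.keys p.2 _ _ hrevnodup hmemsnd
    intro v hv
    by_cases hveq : v = p.2
    · subst hveq
      by_cases hlen : (pvSel l p.2).length ≤ 1
      · rw [if_pos hlen, if_pos rfl, if_neg (by omega)]
        rfl
      · rw [if_neg hlen, if_pos rfl, if_pos (by omega), List.filter_map]
        have hsel : (pvSel l p.2).filter (fun raw => raw == p.1) = [p.1] := by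
          rw [pvSel]
          have hff : ((l.filter (fun r => r.2 == p.2)).filter (fun r => r.1 == p.1))
              = l.filter (fun r => r.1 == p.1 && (r.2 == p.2)) := by
            rw [List.filter_filter]
          have hkey := pv_filter_key l p hfstn hp (fun r => r.2 == p.2)
          rw [if_pos (by simp)] at hkey
          calc ((l.filter (fun r => r.2 == p.2)).map (fun r => r.1)).filter (fun raw => raw == p.1)
              = ((l.filter (fun r => r.2 == p.2)).filter (fun r => r.1 == p.1)).map (fun r => r.1) := by
                rw [List.filter_map]
                try rfl
            _ = (l.filter (fun r => r.1 == p.1 && (r.2 == p.2))).map (fun r => r.1) := by rw [hff]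
            _ = [p.1] := by
                rw [hkey]
                try rfl
        rw [show ((fun w : String × String => w.1 == p.1) ∘ fun raw => ((raw : String), PySem.Str.join "" [p.2, " [", raw, "]"]))
              = (fun raw => raw == p.1) from rfl]
        rw [hsel]
        rfl
    · rw [if_neg hveq]
      by_cases hlen : (pvSel l v).length ≤ 1
      · rw [if_pos hlen]
        rfl
      · rw [if_neg hlen, List.filter_map]
        have hsel : (pvSel l v).filter (fun raw => raw == p.1) = [] := by
          rw [pvSel]
          have heq : ((l.filter (fun r => r.2 == v)).filter (fun r => r.1 == p.1))
              = l.filter (fun r => r.1 == p.1 && (r.2 == v)) := by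
            rw [List.filter_filter]
          have hkey := pv_filter_key l p hfstn hp (fun r => r.2 == v)
          rw [if_neg (by simp; exact fun he => hveq he.symm)] at hkey
          calc ((l.filter (fun r => r.2 == v)).map (fun r => r.1)).filter (fun raw => raw == p.1)
              = ((l.filter (fun r => r.2 == v)).filter (fun r => r.1 == p.1)).map (fun r => r.1) := by
                rw [List.filter_map]
                try rfl
            _ = (l.filter (fun r => r.1 == p.1 && (r.2 == v))).map (fun r => r.1) := by rw [heq]
            _ = [] := by
                rw [hkey]
                try rfl
        rw [show ((fun w : String × String => w.1 == p.1) ∘ fun raw => ((raw : String), PySem.Str.join "" [v, " [", raw, "]"]))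
              = (fun raw => raw == p.1) from rfl]
        rw [hsel]
        rfl
  by_cases hlen : 1 < (pvSel l p.2).length
  · rw [pv_stepFold_one wsA p (pvF p) (by rw [hfilter, if_pos hlen])]
    rw [pvRes, if_pos (by rw [pv_count_sel]; exact hlen)]
  · rw [pv_stepFold_nil wsA p (by rw [hfilter, if_neg hlen])]
    rw [pvRes, if_neg (by rw [pv_count_sel]; exact hlen)]

-- port B computes the same pointwise rewrite of the dict's items
theorem pv_B (labels : List (String × String)) :
    make_unique_labels_py_alt labels
      = (PySem.Dict.ofList labels).items.map (pvRes (PySem.Dict.ofList labels).items) := by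
  simp only [make_unique_labels_py_alt]
  set d := PySem.Dict.ofList labels with hd
  set l := d.items with hldef
  have hfstn : (l.map (fun q => q.1)).Nodup := by
    have := PySem.Dict.nodup_keys_ofList (ν := String) labels
    simpa [PySem.Dict.keys, hd] using this
  set g := fun p : String × String =>
    if l.any (fun q => q.1 != p.1 && q.2 == p.2)
    then PySem.Str.join "" [p.2, " [", p.1, "]"] else p.2 with hg
  have hfold : l.foldl (fun o p => o.insert p.1 (g p)) d
      = (l.map (fun p => (p.1, g p))).foldl (fun o w => o.insert w.1 w.2) d := by
    rw [List.foldl_map]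
  show (l.foldl (fun o p => o.insert p.1 (g p)) d).items = _
  rw [hfold]
  have hcontains : ∀ w ∈ l.map (fun p => (p.1, g p)), d.contains w.1 = true := by
    intro w hw
    rw [List.mem_map] at hw
    obtain ⟨r, hr, rfl⟩ := hw
    rw [PySem.Dict.contains_iff_mem_keys]
    have hk : d.keys = l.map (fun q => q.1) := by
      simp only [PySem.Dict.keys]
      rfl
    rw [hk]
    exact List.mem_map.mpr ⟨r, hr, rfl⟩
  rw [pv_insertFold_items _ d hcontains]
  apply List.map_congr_left
  intro p hp
  have hfilter : (l.map (fun r => (r.1, g r))).filter (fun w => w.1 == p.1) = [(p.1, g p)] := by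
    have hkey := pv_filter_key l p hfstn hp (fun _ => true)
    rw [if_pos rfl] at hkey
    calc (l.map (fun r => (r.1, g r))).filter (fun w => w.1 == p.1)
        = (l.filter (fun r => r.1 == p.1)).map (fun r => (r.1, g r)) := by
          rw [List.filter_map]
          try rfl
      _ = [(p.1, g p)] := by
          have h1 : l.filter (fun r => r.1 == p.1) = [p] := by
            rw [← hkey]
            apply List.filter_congr
            intro r _
            simp
          rw [h1]
          try rfl
  rw [pv_stepFold_one _ p (p.1, g p) hfilter]
  have hdup := pv_dup_iff l p hfstn hp
  rw [pvRes, hg]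
  by_cases hlt : 1 < List.count p.2 (l.map (fun q => q.2))
  · rw [if_pos hlt]
    have hany : l.any (fun q => q.1 != p.1 && q.2 == p.2) = true := by
      rw [hdup, decide_eq_true hlt]
    simp only [hany, if_pos]
    rfl
  · rw [if_neg hlt]
    have hany : l.any (fun q => q.1 != p.1 && q.2 == p.2) = false := by
      rw [hdup, decide_eq_false hlt]
    simp only [hany]
    rfl

-- ===== VERDICT (by name: the statement is the Claim_ definition above) =====
theorem make_unique_labels_py_spec : Claim_equal_make_unique_labels_py := by
  intro labels _
  unfold Spec_make_unique_labels_py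
  rw [pv_A, pv_B]
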